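-- pv_equiv track=rewrite | github.com/AZ268/Project_Euler | Euler_42.py | parse_words
-- ===== SOURCE A (Python) =====
-- def parse_words(text):
--     words = []
--     word = ''
--     inside_quotes = False
--     for char in text:
--         if char == '"':
--             if inside_quotes:
--                 words.append(word)
--                 word = ''
--             inside_quotes = not inside_quotes
--         elif inside_quotes:
--             word += char
--     return words
-- ===== SOURCE B (Python) =====
-- def parse_words(text):
--     # Split on the quote character: parts alternate unquoted, quoted, unquoted, ...
--     # After dropping the leading unquoted part, pair the rest; each pair is
--     # (quoted segment, following unquoted segment); zip drops an unterminated
--     # trailing quote automatically.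
--     parts = text.split('"')
--     it = iter(parts[1:])
--     return [quoted for quoted, _plain in zip(it, it)]
-- ===== Notes on version B (the rewrite author's own statement) =====
-- stated objective: idiomatic
-- what changed: Replaces the char-by-char state machine (inside_quotes flag, growing word accumulator) with one split on the quote character followed by pairing the segments after the first and taking the head of each pair; an unterminated trailing quote is dropped because it has no partner.
import Mathlib
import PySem

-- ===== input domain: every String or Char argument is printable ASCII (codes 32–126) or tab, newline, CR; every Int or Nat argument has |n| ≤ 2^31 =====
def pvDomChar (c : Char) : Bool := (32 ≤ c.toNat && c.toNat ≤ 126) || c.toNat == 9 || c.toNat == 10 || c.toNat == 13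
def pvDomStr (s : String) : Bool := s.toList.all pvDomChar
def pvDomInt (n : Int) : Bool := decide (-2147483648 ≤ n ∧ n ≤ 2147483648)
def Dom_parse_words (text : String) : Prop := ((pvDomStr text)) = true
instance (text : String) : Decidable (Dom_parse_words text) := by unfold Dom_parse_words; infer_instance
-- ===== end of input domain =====

-- B extracts quoted segments by splitting on '"' and pairing the tail segments instead of
-- A's char-by-char state machine; return values proved equal on all inputs.

-- ===== PORT A =====
-- words/word are kept as char lists (Python str concatenation is exact on char lists);
-- the final map to String is the only conversion.
def parseWordsStep (st : List (List Char) × List Char × Bool) (char : Char) :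
    List (List Char) × List Char × Bool :=
  let (words, word, inside_quotes) := st
  if char = '"' then
    if inside_quotes then (words ++ [word], [], !inside_quotes)
    else (words, word, !inside_quotes)
  else if inside_quotes then (words, word ++ [char], inside_quotes)
  else (words, word, inside_quotes)

def parse_words (text : String) : List String :=
  (text.toList.foldl parseWordsStep ([], [], false)).1.map String.ofList

-- ===== PORT B =====
-- zip(it, it) over an iterator yields consecutive disjoint pairs and drops an unpaired
-- tail element; pairHeads transcribes exactly that, keeping each pair's first component.
def pairHeads (parts : List (List Char)) : List (List Char) :=
  match parts with
  | quoted :: _plain :: rest => quoted :: pairHeads rest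
  | _ => []

def parse_words_alt (text : String) : List String :=
  let parts := PySem.Chars.splitOn text.toList ['"']
  (pairHeads (PySem.List.slice parts (some 1) none)).map String.ofList

-- ===== PRECONDITION & SPEC =====
def Spec_parse_words (text : String) (out : List String) : Prop := out = parse_words_alt text
instance (text : String) (out : List String) : Decidable (Spec_parse_words text out) := by unfold Spec_parse_words; infer_instance

-- ===== CLAIM (what is proved, stated in full; the proofs are below) =====
def Claim_equal_parse_words : Prop := ∀ (text : String), Dom_parse_words text → Spec_parse_words text (parse_words text)

-- ===== LEMMAS AND PROOFS =====

-- simple structural characterisation of splitting on '"'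
def spQ : List Char → List Char → List (List Char)
  | [], cur => [cur.reverse]
  | c :: rest, cur => if c = '"' then cur.reverse :: spQ rest [] else spQ rest (c :: cur)

lemma spQ_ne_nil (l cur : List Char) : spQ l cur ≠ [] := by
  induction l generalizing cur with
  | nil => simp [spQ]
  | cons c rest ih => simp only [spQ]; split_ifs <;> simp [ih]

lemma splitOn_go_eq_spQ (l : List Char) :
    ∀ (fuel : Nat) (cur : List Char) (acc : List (List Char)), l.length ≤ fuel →
      PySem.Chars.splitOn.go ['"'] fuel l cur acc = acc.reverse ++ spQ l cur := by
  induction l with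
  | nil =>
    intro fuel cur acc _
    cases fuel <;> simp [PySem.Chars.splitOn.go, spQ]
  | cons c rest ih =>
    intro fuel cur acc hf
    cases fuel with
    | zero => simp at hf
    | succ f =>
      simp only [List.length_cons] at hf
      by_cases hc : c = '"'
      · subst hc
        have hpre : List.isPrefixOf ['"'] ('"' :: rest) = true := by
          simp [List.isPrefixOf]
        simp only [PySem.Chars.splitOn.go, hpre, if_pos]
        rw [show List.drop (List.length ['"']) ('"' :: rest) = rest by simp]
        rw [ih f [] (cur.reverse :: acc) (by omega)]
        simp [spQ]
      · have hpre : List.isPrefixOf ['"'] (c :: rest) = false := by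
          simp [List.isPrefixOf, BEq.beq]
          intro h; exact absurd h.symm hc
        simp only [PySem.Chars.splitOn.go, hpre]
        rw [if_neg (by simp)]
        rw [ih f (c :: cur) acc (by omega)]
        simp [spQ, hc]

lemma splitOn_eq_spQ (l : List Char) : PySem.Chars.splitOn l ['"'] = spQ l [] := by
  rw [PySem.Chars.splitOn, splitOn_go_eq_spQ l (l.length + 1) [] [] (by omega)]
  simp

-- the key invariant relating A's fold to pairHeads of the split
lemma fold_key (l : List Char) :
    (∀ words word, (l.foldl parseWordsStep (words, word, true)).1
        = words ++ pairHeads (spQ l word.reverse)) ∧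
    (∀ words cur, (l.foldl parseWordsStep (words, [], false)).1
        = words ++ pairHeads ((spQ l cur).tail)) := by
  induction l with
  | nil => constructor <;> intros <;> simp [spQ, pairHeads]
  | cons c rest ih =>
    obtain ⟨ihT, ihF⟩ := ih
    constructor
    · intro words word
      by_cases hc : c = '"'
      · subst hc
        have hstep : parseWordsStep (words, word, true) '"' = (words ++ [word], [], false) := by
          simp [parseWordsStep]
        rw [List.foldl_cons, hstep, ihF (words ++ [word]) []]
        obtain ⟨p, ps, hps⟩ : ∃ p ps, spQ rest [] = p :: ps := by
          cases h : spQ rest [] with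
          | nil => exact absurd h (spQ_ne_nil rest [])
          | cons p ps => exact ⟨p, ps, rfl⟩
        simp [spQ, hps, pairHeads]
      · have hstep : parseWordsStep (words, word, true) c = (words, word ++ [c], true) := by
          simp [parseWordsStep, hc]
        rw [List.foldl_cons, hstep, ihT words (word ++ [c])]
        simp [spQ, hc]
    · intro words cur
      by_cases hc : c = '"'
      · subst hc
        have hstep : parseWordsStep (words, [], false) '"' = (words, [], true) := by
          simp [parseWordsStep]
        rw [List.foldl_cons, hstep, ihT words []]
        simp [spQ]
      · have hstep : parseWordsStep (words, [], false) c = (words, [], false) := by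
          simp [parseWordsStep, hc]
        rw [List.foldl_cons, hstep, ihF words (c :: cur)]
        simp [spQ, hc]

-- ===== VERDICT (by name: the statement is the Claim_ definition above) =====
theorem parse_words_spec : Claim_equal_parse_words := by
  intro text _
  unfold Spec_parse_words parse_words parse_words_alt
  simp only [PySem.List.slice_from_one, splitOn_eq_spQ]
  rw [(fold_key text.toList).2 [] []]
  simp
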